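-- pv_equiv track=rewrite | github.com/PlumpMath/desc | heatmaps.py | make_collapse_map
-- ===== SOURCE A (Python) =====
-- from collections import defaultdict
--
-- def make_collapse_map(ids, names):
--     """ use the data on source entities and collapse redundant entries """
--
--     collapse = defaultdict(list)
--
--     for id_, name in zip(ids, names):
--         collapse[name].append(id_)
--
--     unames = list(collapse.keys())
--     unames.sort()  # this masks any prior sorting
--     ids_list = []
--     for n in unames:
--         ids_list.append(tuple(collapse[n]))
--
--     return ids_list, unames
-- ===== SOURCE B (Python) =====
-- def make_collapse_map(ids, names):
--     """ use the data on source entities and collapse redundant entries """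
--     # stable sort keyed on the name only: same-name ids keep their original order
--     pairs = sorted(zip(ids, names), key=lambda p: p[1])
--     ids_list, unames = [], []
--     for i, name in pairs:
--         if not unames or unames[-1] != name:
--             ids_list.append([i])
--             unames.append(name)
--         else:
--             ids_list[-1].append(i)
--     return [tuple(g) for g in ids_list], unames
-- ===== Notes on version B (the rewrite author's own statement) =====
-- stated objective: alternative
-- what changed: Replaces the defaultdict hash-grouping pass followed by sorting the keys with a sort-first strategy: stably sort the zipped (id, name) pairs by name only, then one linear scan groups consecutive equal names.
import Mathlib
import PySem

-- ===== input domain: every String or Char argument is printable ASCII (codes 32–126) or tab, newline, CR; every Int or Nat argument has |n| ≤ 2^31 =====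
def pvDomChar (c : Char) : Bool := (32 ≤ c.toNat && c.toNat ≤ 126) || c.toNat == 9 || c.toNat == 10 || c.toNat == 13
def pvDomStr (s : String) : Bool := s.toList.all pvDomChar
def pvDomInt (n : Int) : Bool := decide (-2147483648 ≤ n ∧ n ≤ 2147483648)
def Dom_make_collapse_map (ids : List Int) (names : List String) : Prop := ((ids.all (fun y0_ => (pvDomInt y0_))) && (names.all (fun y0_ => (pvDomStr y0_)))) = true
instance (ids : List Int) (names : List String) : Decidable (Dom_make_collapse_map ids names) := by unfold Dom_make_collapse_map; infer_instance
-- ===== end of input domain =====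

-- B replaces A's defaultdict grouping (hash-group then sort the keys) with sort-first-then-scan:
-- stably sort the zipped pairs by name only, then one linear pass groups consecutive equal names (alternative decomposition, same results).

-- ===== PORT A =====
def make_collapse_map (ids : List Int) (names : List String) : List (List Int) × List String :=
  -- collapse = defaultdict(list); for id_, name in zip(ids, names): collapse[name].append(id_)
  let collapse : PySem.Dict String (List Int) :=
    (ids.zip names).foldl (fun d p => d.modify p.2 [] (· ++ [p.1])) PySem.Dict.empty
  -- unames = list(collapse.keys()); unames.sort()
  let unames := PySem.List.sorted collapse.keys (fun x => x) false
  -- ids_list = []; for n in unames: ids_list.append(tuple(collapse[n]))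
  let ids_list := unames.foldl (fun acc n => acc ++ [collapse.getD n []]) []
  (ids_list, unames)

-- ===== PORT B =====
-- 'ids_list[-1].append(i)' : append i to the last group
def mcmAppendLast (ll : List (List Int)) (i : Int) : List (List Int) :=
  match ll with
  | [] => []
  | [g] => [g ++ [i]]
  | g :: rest => g :: mcmAppendLast rest i

-- the body of B's loop: 'if not unames or unames[-1] != name: start a new group else: append to the last'
def mcmStep (st : List (List Int) × List String) (p : Int × String) : List (List Int) × List String :=
  match st.2.getLast? with
  | none => ([[p.1]], [p.2])
  | some m => if m = p.2 then (mcmAppendLast st.1 p.1, st.2)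
              else (st.1 ++ [[p.1]], st.2 ++ [p.2])

def make_collapse_map_alt (ids : List Int) (names : List String) : List (List Int) × List String :=
  -- pairs = sorted(zip(ids, names), key=lambda p: p[1])
  let pairs := PySem.List.sorted (ids.zip names) (fun p => p.2) false
  -- the loop over pairs accumulating (ids_list, unames)
  let st := pairs.foldl mcmStep ([], [])
  -- return [tuple(g) for g in ids_list], unames  — tuple(g) is the identity under the type convention
  (st.1.map (fun g => g), st.2)

-- ===== PRECONDITION & SPEC =====
def Spec_make_collapse_map (ids : List Int) (names : List String) (out : List (List Int) × List String) : Prop := out = make_collapse_map_alt ids names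
instance (ids : List Int) (names : List String) (out : List (List Int) × List String) : Decidable (Spec_make_collapse_map ids names out) := by unfold Spec_make_collapse_map; infer_instance

-- ===== CLAIM (what is proved, stated in full; the proofs are below) =====
def Claim_equal_make_collapse_map : Prop := ∀ (ids : List Int) (names : List String), Dom_make_collapse_map ids names → Spec_make_collapse_map ids names (make_collapse_map ids names)

-- ===== LEMMAS AND PROOFS =====

-- A's grouping fold keyed on the pair's SECOND component, reduced to the library lemma via Prod.swap
theorem getD_collapse (l : List (Int × String)) (c : String) :
    ((l.foldl (fun d p => d.modify p.2 [] (· ++ [p.1])) PySem.Dict.empty).getD c [])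
      = (l.filter (fun p => p.2 == c)).map Prod.fst := by
  have h : (l.foldl (fun d p => d.modify p.2 [] (· ++ [p.1])) PySem.Dict.empty)
      = ((l.map Prod.swap).foldl (fun d p => d.modify p.1 [] (· ++ [p.2])) PySem.Dict.empty) := by
    rw [List.foldl_map]; rfl
  rw [h, PySem.Dict.getD_foldl_modify_append]
  simp [List.filter_map, List.map_map, Function.comp_def, PySem.Dict.getD_empty]

theorem keys_collapse (l : List (Int × String)) :
    ((l.foldl (fun d p => d.modify p.2 [] (· ++ [p.1])) PySem.Dict.empty).keys)
      = PySem.Set.ofList (l.map Prod.snd) := by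
  have := PySem.Dict.keys_foldl_modify_key (l := l) (key := Prod.snd)
    (d0 := ([] : List Int)) (f := fun (d : PySem.Dict String (List Int)) p => (· ++ [p.1]))
    (d := PySem.Dict.empty)
  simpa [PySem.Dict.keys_empty, PySem.Set.update, PySem.Set.ofList_eq_foldl] using this

-- basic insertBy facts not in the library
theorem insertBy_before_true {α : Type} (before : α → α → Bool) (x : α) (l : List α)
    (h : ∀ y ∈ l, before x y = true) : PySem.List.insertBy before x l = x :: l := by
  cases l with
  | nil => rfl
  | cons y ys => simp [PySem.List.insertBy, h y (List.mem_cons_self)]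

theorem insertBy_append_left {α : Type} (before : α → α → Bool) (x : α) (l1 l2 : List α)
    (h : ∀ y ∈ l1, before x y = false) :
    PySem.List.insertBy before x (l1 ++ l2) = l1 ++ PySem.List.insertBy before x l2 := by
  induction l1 with
  | nil => simp
  | cons y ys ih =>
      simp only [List.cons_append, PySem.List.insertBy, h y (List.mem_cons_self)]
      simp only [Bool.false_eq_true, if_false]
      exact congrArg (y :: ·) (ih fun z hz => h z (List.mem_cons_of_mem _ hz))

theorem insertBy_perm {α : Type} (before : α → α → Bool) (x : α) (l : List α) :
    (PySem.List.insertBy before x l).Perm (x :: l) := by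
  induction l with
  | nil => simp [PySem.List.insertBy]
  | cons y ys ih =>
      simp only [PySem.List.insertBy]
      split
      · exact List.Perm.refl _
      · exact (ih.cons y).trans (List.Perm.swap x y ys)

theorem pairwise_lt_insertBy (k : String) (K : List String)
    (hK : K.Pairwise (· < ·)) (hk : k ∉ K) :
    (PySem.List.insertBy (fun a b => decide (a < b)) k K).Pairwise (· < ·) := by
  induction K with
  | nil => simp [PySem.List.insertBy]
  | cons n K' ih =>
      rcases List.pairwise_cons.mp hK with ⟨hn, hK'⟩
      simp only [PySem.List.insertBy]
      by_cases hlt : k < n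
      · simp only [hlt, decide_true, if_true]
        refine List.pairwise_cons.mpr ⟨?_, hK⟩
        intro y hy
        rcases List.mem_cons.mp hy with rfl | hy'
        · exact hlt
        · exact lt_trans hlt (hn y hy')
      · have hne : k ≠ n := fun h => hk (h ▸ List.mem_cons_self)
        have hgt : n < k := lt_of_le_of_ne (not_lt.mp hlt) (Ne.symm hne)
        simp only [hlt, decide_false, Bool.false_eq_true, if_false]
        refine List.pairwise_cons.mpr ⟨?_, ih hK' (fun h => hk (List.mem_cons_of_mem _ h))⟩
        intro y hy
        rcases (PySem.List.mem_insertBy _ _ _ _).mp hy with rfl | hy'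
        · exact hgt
        · exact hn y hy'

-- keys of filtered groups
theorem filter_snd_eq_nil (l : List (Int × String)) (n : String)
    (h : n ∉ l.map Prod.snd) : l.filter (fun p => p.2 == n) = [] := by
  refine List.filter_eq_nil_iff.mpr fun p hp hb => ?_
  exact h (List.mem_map.mpr ⟨p, hp, eq_of_beq hb⟩)

-- STABILITY, existing-key case: x is inserted at the end of its own group
theorem insert_into_groups_mem (x : Int × String) (K : List String)
    (g : String → List (Int × String)) (hK : K.Pairwise (· < ·)) (hk : x.2 ∈ K)
    (hg : ∀ n p, p ∈ g n → p.2 = n) :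
    PySem.List.insertBy (fun a b => decide (a.2 < b.2)) x (K.flatMap g)
      = K.flatMap (fun n => g n ++ if n = x.2 then [x] else []) := by
  induction K with
  | nil => cases hk
  | cons n K' ih =>
      rcases List.pairwise_cons.mp hK with ⟨hn, hK'⟩
      by_cases hnx : n = x.2
      · -- x's own group: pass it, then insert before everything in K'
        have hpass : ∀ y ∈ g n, (fun a b : Int × String => decide (a.2 < b.2)) x y = false := by
          intro y hy
          have h2 : y.2 = n := hg n y hy
          simp [h2, hnx]
        have hrest : ∀ y ∈ K'.flatMap g,
            (fun a b : Int × String => decide (a.2 < b.2)) x y = true := by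
          intro y hy
          rcases List.mem_flatMap.mp hy with ⟨m, hm, hym⟩
          have h2 : y.2 = m := hg m y hym
          have hlt : n < m := hn m hm
          rw [hnx] at hlt
          simp [h2, hlt]
        have hnot : x.2 ∉ K' := fun h => absurd (hn _ h) (by simp [hnx])
        rw [List.flatMap_cons, insertBy_append_left _ _ _ _ hpass,
            insertBy_before_true _ _ _ hrest, List.flatMap_cons]
        have hK'same : K'.flatMap (fun m => g m ++ if m = x.2 then [x] else [])
            = K'.flatMap g := by
          refine List.flatMap_congr ?_
          intro m hm
          rw [if_neg (fun h : m = x.2 => hnot (h ▸ hm))]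
          simp
        rw [hK'same]
        simp [hnx]
      · -- a smaller group: x passes it unchanged
        have hk' : x.2 ∈ K' := by
          rcases List.mem_cons.mp hk with h | h
          · exact absurd h.symm hnx
          · exact h
        have hlt : n < x.2 := hn _ hk'
        have hpass : ∀ y ∈ g n, (fun a b : Int × String => decide (a.2 < b.2)) x y = false := by
          intro y hy
          simp [hg n y hy, not_lt.mpr (le_of_lt hlt)]
        rw [List.flatMap_cons, insertBy_append_left _ _ _ _ hpass, ih hK' hk',
            List.flatMap_cons]
        simp [fun h : n = x.2 => hnx h]

-- STABILITY, new-key case: x opens a group of its own at the sorted position of its key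
theorem insert_into_groups_new (x : Int × String) (K : List String)
    (g : String → List (Int × String)) (hK : K.Pairwise (· < ·)) (hk : x.2 ∉ K)
    (hg : ∀ n p, p ∈ g n → p.2 = n) :
    PySem.List.insertBy (fun a b => decide (a.2 < b.2)) x (K.flatMap g)
      = (PySem.List.insertBy (fun a b => decide (a < b)) x.2 K).flatMap
          (fun n => if n = x.2 then [x] else g n) := by
  induction K with
  | nil => simp [PySem.List.insertBy]
  | cons n K' ih =>
      rcases List.pairwise_cons.mp hK with ⟨hn, hK'⟩
      have hne : n ≠ x.2 := fun h => hk (h ▸ List.mem_cons_self)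
      by_cases hlt : x.2 < n
      · -- all keys ahead are larger: x goes first
        have hall : ∀ y ∈ (n :: K').flatMap g,
            (fun a b : Int × String => decide (a.2 < b.2)) x y = true := by
          intro y hy
          rcases List.mem_flatMap.mp hy with ⟨m, hm, hym⟩
          have hym2 : y.2 = m := hg m y hym
          rcases List.mem_cons.mp hm with rfl | hm'
          · simp [hym2, hlt]
          · simp [hym2, lt_trans hlt (hn m hm')]
        rw [insertBy_before_true _ _ _ hall]
        simp only [PySem.List.insertBy, hlt, decide_true, if_true, List.flatMap_cons]
        have : (n :: K').flatMap (fun m => if m = x.2 then [x] else g m)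
            = (n :: K').flatMap g := by
          refine List.flatMap_congr ?_
          intro m hm
          have : m ≠ x.2 := by
            rintro rfl; exact hk hm
          simp [this]
        simp only [List.flatMap_cons] at this
        simp [this]
      · have hgt : n < x.2 := lt_of_le_of_ne (not_lt.mp hlt) hne
        have hpass : ∀ y ∈ g n, (fun a b : Int × String => decide (a.2 < b.2)) x y = false := by
          intro y hy
          simp [hg n y hy, not_lt.mpr (le_of_lt hgt)]
        have hk' : x.2 ∉ K' := fun h => hk (List.mem_cons_of_mem _ h)
        rw [List.flatMap_cons, insertBy_append_left _ _ _ _ hpass, ih hK' hk']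
        simp only [PySem.List.insertBy, hlt, decide_false, Bool.false_eq_true, if_false,
          List.flatMap_cons]
        simp [hne]

-- the stable sort by snd, characterised as the sorted distinct names with the filters concatenated
theorem sorted_snd_eq_groups (l : List (Int × String)) :
    PySem.List.sorted l (fun p => p.2) false
      = (PySem.List.sorted (PySem.Set.ofList (l.map Prod.snd)) (fun x => x) false).flatMap
          (fun n => l.filter (fun p => p.2 == n)) := by
  induction l using List.reverseRecOn with
  | nil => simp [PySem.List.sorted, PySem.Set.ofList]
  | append_singleton l x ih =>
      have hset : PySem.Set.ofList ((l ++ [x]).map Prod.snd)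
          = PySem.Set.add (PySem.Set.ofList (l.map Prod.snd)) x.2 := by
        simp [PySem.Set.ofList_eq_foldl, List.foldl_append]
      set K := PySem.List.sorted (PySem.Set.ofList (l.map Prod.snd)) (fun x => x) false with hKdef
      have hKpw : K.Pairwise (· < ·) := PySem.List.sorted_ofList_pairwise_lt _
      have hKmem : ∀ n, n ∈ K ↔ n ∈ l.map Prod.snd := by
        intro n
        rw [hKdef, PySem.List.mem_sorted, PySem.Set.mem_ofList]
      have hg : ∀ n p, p ∈ l.filter (fun p => p.2 == n) → p.2 = n := by
        intro n p hp
        exact eq_of_beq (List.mem_filter.mp hp).2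
      have hfold : PySem.List.sorted (l ++ [x]) (fun p => p.2) false
          = PySem.List.insertBy (fun a b => decide (a.2 < b.2)) x
              (PySem.List.sorted l (fun p => p.2) false) := by
        rw [PySem.List.sorted_eq_foldl_insertBy, PySem.List.sorted_eq_foldl_insertBy,
          List.foldl_append]
        rfl
      have hfilter : ∀ n, (l ++ [x]).filter (fun p => p.2 == n)
          = l.filter (fun p => p.2 == n) ++ if x.2 = n then [x] else [] := by
        intro n
        rw [List.filter_append]
        by_cases h : x.2 = n
        · simp [List.filter, h]
        · have hb : (x.2 == n) = false := beq_false_of_ne h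
          simp [List.filter, hb, h]
      by_cases hmem : x.2 ∈ l.map Prod.snd
      · -- existing key: the key set and K are unchanged
        have hsame : PySem.Set.add (PySem.Set.ofList (l.map Prod.snd)) x.2
            = PySem.Set.ofList (l.map Prod.snd) := by
          simp [PySem.Set.add, PySem.Set.contains,
            (PySem.Set.mem_ofList _ _).mpr hmem]
        rw [hfold, ih, hset, hsame, ← hKdef,
          insert_into_groups_mem x K _ hKpw ((hKmem x.2).mpr hmem) hg]
        refine List.flatMap_congr ?_
        intro n _
        rw [hfilter n]
        by_cases h : n = x.2
        · simp [h]
        · rw [if_neg (fun hh : x.2 = n => h hh.symm), if_neg h]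
      · -- new key: K gains x.2 at its sorted position
        have hnotK : x.2 ∉ K := fun h => hmem ((hKmem x.2).mp h)
        have happend : PySem.Set.add (PySem.Set.ofList (l.map Prod.snd)) x.2
            = PySem.Set.ofList (l.map Prod.snd) ++ [x.2] := by
          have : x.2 ∉ PySem.Set.ofList (l.map Prod.snd) :=
            fun h => hmem ((PySem.Set.mem_ofList _ _).mp h)
          simp [PySem.Set.add, PySem.Set.contains, this]
        have hKnew : PySem.List.sorted (PySem.Set.ofList (l.map Prod.snd) ++ [x.2]) (fun x => x) false
            = PySem.List.insertBy (fun a b => decide (a < b)) x.2 K := by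
          refine PySem.List.sorted_eq_of_perm_of_pairwise_lt _ _ _ ?_ ?_
          · refine (insertBy_perm _ _ _).trans ?_
            refine ((PySem.List.sorted_perm _ _ _).cons x.2).trans ?_
            exact (List.perm_append_singleton _ _).symm
          · exact pairwise_lt_insertBy _ _ hKpw hnotK
        rw [hfold, ih, hset, happend, hKnew,
          insert_into_groups_new x K _ hKpw hnotK hg]
        refine List.flatMap_congr ?_
        intro n hn
        have hnmem : n = x.2 ∨ n ∈ K := (PySem.List.mem_insertBy _ _ _ _).mp hn
        rw [hfilter n]
        by_cases h : n = x.2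
        · subst h
          simp [filter_snd_eq_nil l _ hmem]
        · simp only [if_neg h, if_neg (fun hh : x.2 = n => h hh.symm), List.append_nil]

-- B's loop: appending to the last group
theorem mcmAppendLast_concat (gs : List (List Int)) (g : List Int) (i : Int) :
    mcmAppendLast (gs ++ [g]) i = gs ++ [g ++ [i]] := by
  induction gs with
  | nil => rfl
  | cons h t ih =>
      cases t with
      | nil => simp [mcmAppendLast]
      | cons h' t' => simpa [mcmAppendLast] using ih

-- B's loop over one same-name run: everything lands in the last group
theorem foldl_mcmStep_run (n : String) (l : List (Int × String)) (gs : List (List Int))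
    (g : List Int) (ks : List String) (hl : ∀ p ∈ l, p.2 = n) (hlast : ks.getLast? = some n) :
    l.foldl mcmStep (gs ++ [g], ks) = (gs ++ [g ++ l.map Prod.fst], ks) := by
  induction l generalizing g with
  | nil => simp
  | cons p l' ih =>
      have hp : p.2 = n := hl p List.mem_cons_self
      have hstep : mcmStep (gs ++ [g], ks) p = (gs ++ [g ++ [p.1]], ks) := by
        simp [mcmStep, hlast, hp, mcmAppendLast_concat]
      rw [List.foldl_cons, hstep, ih _ (fun q hq => hl q (List.mem_cons_of_mem _ hq))]
      simp

-- B's loop over the whole grouped list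
theorem foldl_mcmStep_groups (K : List String) (g : String → List (Int × String))
    (gs : List (List Int)) (ks : List String)
    (hK : K.Pairwise (· < ·)) (hne : ∀ n ∈ K, g n ≠ [])
    (hg : ∀ n p, p ∈ g n → p.2 = n)
    (hstart : (gs = [] ∧ ks = []) ∨ ∃ m, ks.getLast? = some m ∧ ∀ n ∈ K, m < n) :
    (K.flatMap g).foldl mcmStep (gs, ks)
      = (gs ++ K.map (fun n => (g n).map Prod.fst), ks ++ K) := by
  induction K generalizing gs ks with
  | nil => simp
  | cons n K' ih =>
      rcases List.pairwise_cons.mp hK with ⟨hn, hK'⟩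
      obtain ⟨p, l, hpl⟩ : ∃ p l, g n = p :: l := by
        cases h : g n with
        | nil => exact absurd h (hne n List.mem_cons_self)
        | cons p l => exact ⟨p, l, rfl⟩
      have hp : p.2 = n := hg n p (hpl ▸ List.mem_cons_self)
      have hstep : mcmStep (gs, ks) p = (gs ++ [[p.1]], ks ++ [n]) := by
        rcases hstart with ⟨hgs, hks⟩ | ⟨m, hm, hlt⟩
        · subst hgs; subst hks
          simp [mcmStep, hp]
        · have hmn : m ≠ n := ne_of_lt (hlt n List.mem_cons_self)
          simp [mcmStep, hm, hp, hmn]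
      have hrun : l.foldl mcmStep (gs ++ [[p.1]], ks ++ [n])
          = (gs ++ [[p.1] ++ l.map Prod.fst], ks ++ [n]) := by
        refine foldl_mcmStep_run n l gs _ _ ?_ ?_
        · intro q hq; exact hg n q (hpl ▸ List.mem_cons_of_mem _ hq)
        · simp
      have hrest := ih (gs ++ [[p.1] ++ l.map Prod.fst]) (ks ++ [n]) hK'
        (fun m hm => hne m (List.mem_cons_of_mem _ hm)) (Or.inr ⟨n, by simp, hn⟩)
      rw [List.flatMap_cons, List.foldl_append, hpl, List.foldl_cons, hstep, hrun, hrest]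
      simp [hpl]

-- ===== VERDICT (by name: the statement is the Claim_ definition above) =====
theorem make_collapse_map_spec : Claim_equal_make_collapse_map := by
  intro ids names _
  show make_collapse_map ids names = make_collapse_map_alt ids names
  simp only [make_collapse_map, make_collapse_map_alt]
  set pairs := ids.zip names with hpairs
  set K := PySem.List.sorted (PySem.Set.ofList (pairs.map Prod.snd)) (fun x => x) false with hKdef
  have hKpw : K.Pairwise (· < ·) := PySem.List.sorted_ofList_pairwise_lt _
  have hg : ∀ n p, p ∈ pairs.filter (fun p => p.2 == n) → p.2 = n := by
    intro n p hp
    exact eq_of_beq (List.mem_filter.mp hp).2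
  have hne : ∀ n ∈ K, pairs.filter (fun p => p.2 == n) ≠ [] := by
    intro n hn
    have : n ∈ pairs.map Prod.snd := by
      rw [hKdef, PySem.List.mem_sorted, PySem.Set.mem_ofList] at hn
      exact hn
    rcases List.mem_map.mp this with ⟨p, hp, hps⟩
    intro hnil
    have : p ∈ pairs.filter (fun p => p.2 == n) :=
      List.mem_filter.mpr ⟨hp, by simp [hps]⟩
    simp [hnil] at this
  rw [keys_collapse, PySem.List.foldl_append_singleton_eq_map, sorted_snd_eq_groups,
    ← hKdef, foldl_mcmStep_groups K _ [] [] hKpw hne hg (Or.inl ⟨rfl, rfl⟩)]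
  simp only [List.nil_append, List.map_id']
  exact congrArg₂ Prod.mk
    (List.map_congr_left fun m _ => getD_collapse pairs m) rfl
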